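-- pv_equiv track=rewrite | github.com/vyalsgh-tech/my-timetable-next | tools/step24_restore_mobile_from_clean_backup.py | remove_css_artifacts
-- ===== SOURCE A (Python) =====
-- def remove_css_artifacts(text: str) -> str:
--     lines = text.splitlines()
--     out = []
--     skip = False
--     for line in lines:
--         stripped = line.strip()
--         if not skip and (
--             ('div[data-testid="stButton"]' in line and '{' in line)
--             or ('.mdgo-strike' in line and '{' in line)
--         ):
--             skip = True
--             continue
--         if skip:
--             if stripped in ('}', '}}') or stripped.endswith('}') or '</style>' in stripped:
--                 skip = False
--             continue
--         bad_tokens = [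
--             'white-space: nowrap !important',
--             'word-break: keep-all !important',
--             'min-width:',
--             'padding-left:',
--             'padding-right:',
--             'text-decoration-line:',
--             'text-decoration-thickness:',
--             'text-decoration-color:',
--             'opacity:',
--         ]
--         if any(tok in line for tok in bad_tokens):
--             continue
--         out.append(line)
--     return '\n'.join(out) + '\n'
-- ===== SOURCE B (Python) =====
-- BAD_TOKENS = [
--     'white-space: nowrap !important',
--     'word-break: keep-all !important',
--     'min-width:',
--     'padding-left:',
--     'padding-right:',
--     'text-decoration-line:',
--     'text-decoration-thickness:',
--     'text-decoration-color:',
--     'opacity:',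
-- ]
--
--
-- def _opens(line: str) -> bool:
--     return (('div[data-testid="stButton"]' in line and '{' in line)
--             or ('.mdgo-strike' in line and '{' in line))
--
--
-- def _closes(stripped: str) -> bool:
--     return (stripped in ('}', '}}') or stripped.endswith('}')
--             or '</style>' in stripped)
--
--
-- def remove_css_artifacts(text: str) -> str:
--     lines = text.splitlines()
--     n = len(lines)
--     # Pass 1: mark every line that belongs to a removed CSS block (opener,
--     # body and closer) in a boolean mask; no output is built here.
--     dead = [False] * n
--     i = 0
--     while i < n:
--         if _opens(lines[i]):
--             dead[i] = True
--             j = i + 1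
--             while j < n:
--                 dead[j] = True
--                 if _closes(lines[j].strip()):
--                     break
--                 j += 1
--             i = j + 1
--         else:
--             i += 1
--     # Pass 2: keep the lines that are not masked and carry no bad token.
--     # (Bad-token filtering over masked lines is vacuous, so the two passes commute.)
--     kept = [l for k, l in enumerate(lines)
--             if not dead[k] and not any(tok in l for tok in BAD_TOKENS)]
--     return '\n'.join(kept) + '\n'
-- ===== Notes on version B (the rewrite author's own statement) =====
-- stated objective: alternative
-- what changed: Splits A's single stateful filtering loop into two staged passes: a first pass that only computes a boolean dead-line mask covering each removed CSS block (opener through closer), and a second pass, a comprehension over enumerate, that keeps unmasked lines without bad tokens (the token filter commutes past the mask because masked lines are dropped anyway).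
import Mathlib
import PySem

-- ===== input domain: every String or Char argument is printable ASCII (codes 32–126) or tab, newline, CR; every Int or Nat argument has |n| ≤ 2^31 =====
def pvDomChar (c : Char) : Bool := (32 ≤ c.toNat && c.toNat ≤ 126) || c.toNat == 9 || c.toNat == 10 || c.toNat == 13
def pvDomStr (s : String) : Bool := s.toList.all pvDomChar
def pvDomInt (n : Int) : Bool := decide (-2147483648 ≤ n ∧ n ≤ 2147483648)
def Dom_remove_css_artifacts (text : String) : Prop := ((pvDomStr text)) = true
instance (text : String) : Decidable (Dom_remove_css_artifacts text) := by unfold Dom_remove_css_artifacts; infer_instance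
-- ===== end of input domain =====

-- B replaces A's one stateful filtering loop by two staged passes (compute a dead-line mask
-- for the removed CSS blocks, then filter by mask and bad tokens); return values proved equal.

-- ===== PORT A =====
-- line predicates (identical literals in both Pythons)
def pvOpens (line : String) : Bool :=
  (PySem.Str.isIn "div[data-testid=\"stButton\"]" line && PySem.Str.isIn "{" line)
    || (PySem.Str.isIn ".mdgo-strike" line && PySem.Str.isIn "{" line)

def pvCloses (stripped : String) : Bool :=
  (stripped == "}" || stripped == "}}") || PySem.Str.endswith stripped "}"
    || PySem.Str.isIn "</style>" stripped

def pvBadTokens : List String :=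
  ["white-space: nowrap !important", "word-break: keep-all !important", "min-width:",
   "padding-left:", "padding-right:", "text-decoration-line:", "text-decoration-thickness:",
   "text-decoration-color:", "opacity:"]

def pvBad (line : String) : Bool := pvBadTokens.any (fun tok => PySem.Str.isIn tok line)

-- A's for-loop, one step per line over the state (out, skip)
def pvAStep (st : List String × Bool) (line : String) : List String × Bool :=
  let stripped := PySem.Str.strip line
  if !st.2 && pvOpens line then (st.1, true)
  else if st.2 then
    if pvCloses stripped then (st.1, false) else (st.1, true)
  else if pvBad line then st
  else (st.1 ++ [line], st.2)

def remove_css_artifacts (text : String) : String :=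
  PySem.Str.join "\n" (((PySem.Str.splitlines text).foldl pvAStep ([], false)).1) ++ "\n"

-- ===== PORT B =====
-- pass 1: the boolean dead-line mask (the outer while loop marks openers, the inner while
-- loop marks block bodies up to and including the closing line)
mutual
  def pvMask : List String → List Bool
    | [] => []
    | l :: rest => if pvOpens l then true :: pvMaskBlock rest else false :: pvMask rest
  def pvMaskBlock : List String → List Bool
    | [] => []
    | l :: rest =>
      if pvCloses (PySem.Str.strip l) then true :: pvMask rest else true :: pvMaskBlock rest
end

-- pass 2: the comprehension over enumerate(lines) with the mask
def pvKeep (ps : List (String × Bool)) : List String :=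
  ps.filterMap (fun p => if !p.2 && !pvBad p.1 then some p.1 else none)

def remove_css_artifacts_alt (text : String) : String :=
  let lines := PySem.Str.splitlines text
  PySem.Str.join "\n" (pvKeep (lines.zip (pvMask lines))) ++ "\n"

-- ===== PRECONDITION & SPEC =====
def Spec_remove_css_artifacts (text : String) (out : String) : Prop := out = remove_css_artifacts_alt text
instance (text : String) (out : String) : Decidable (Spec_remove_css_artifacts text out) := by unfold Spec_remove_css_artifacts; infer_instance

-- ===== CLAIM (what is proved, stated in full; the proofs are below) =====
def Claim_equal_remove_css_artifacts : Prop := ∀ (text : String), Dom_remove_css_artifacts text → Spec_remove_css_artifacts text (remove_css_artifacts text)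

-- ===== LEMMAS AND PROOFS =====

-- joint invariant: A's loop from either flag value equals out ++ B's mask-and-filter result
theorem pvFoldl_eq_keep (xs : List String) : ∀ out : List String,
    ((xs.foldl pvAStep (out, false)).1 = out ++ pvKeep (xs.zip (pvMask xs)))
      ∧ ((xs.foldl pvAStep (out, true)).1 = out ++ pvKeep (xs.zip (pvMaskBlock xs))) := by
  induction xs with
  | nil => intro out; simp [pvMask, pvMaskBlock, pvKeep]
  | cons l rest ih =>
    intro out
    constructor
    · simp only [List.foldl_cons, pvMask]
      by_cases ho : pvOpens l = true
      · rw [show pvAStep (out, false) l = (out, true) by simp [pvAStep, ho]]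
        simp [ho, pvKeep, (ih out).2]
      · by_cases hb : pvBad l = true
        · rw [show pvAStep (out, false) l = (out, false) by simp [pvAStep, ho, hb]]
          simp [ho, hb, pvKeep, (ih out).1]
        · rw [show pvAStep (out, false) l = (out ++ [l], false) by simp [pvAStep, ho, hb]]
          simp [ho, hb, pvKeep, (ih (out ++ [l])).1]
    · simp only [List.foldl_cons, pvMaskBlock]
      by_cases hc : pvCloses (PySem.Str.strip l) = true
      · rw [show pvAStep (out, true) l = (out, false) by simp [pvAStep, hc]]
        simp [hc, pvKeep, (ih out).1]
      · rw [show pvAStep (out, true) l = (out, true) by simp [pvAStep, hc]]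
        simp [hc, pvKeep, (ih out).2]

-- ===== VERDICT (by name: the statement is the Claim_ definition above) =====
theorem remove_css_artifacts_spec : Claim_equal_remove_css_artifacts := by
  intro text _
  unfold Spec_remove_css_artifacts remove_css_artifacts remove_css_artifacts_alt
  rw [(pvFoldl_eq_keep _ []).1]
  simp
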